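-- pv_equiv track=rewrite | github.com/mohammed0115/wasla-version-2 | wasla/apps/payments/infrastructure/webhooks/signatures.py | _normalize_signature
-- ===== SOURCE A (Python) =====
-- def _normalize_signature(signature: str) -> str:
--     if not signature:
--         return ""
--     value = signature.strip()
--     if value.startswith("sha256="):
--         return value.split("=", 1)[1].strip()
--     if "," in value and "=" in value:
--         parts = {}
--         for item in value.split(","):
--             if "=" not in item:
--                 continue
--             key, val = item.split("=", 1)
--             parts[key.strip()] = val.strip()
--         for key in ("v1", "signature", "sig"):
--             if key in parts:
--                 return parts[key]
--     return value
-- ===== SOURCE B (Python) =====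
-- _PRIORITY = {"v1": 0, "signature": 1, "sig": 2}
--
-- def _normalize_signature(signature: str) -> str:
--     if not signature:
--         return ""
--     value = signature.strip()
--     if value.startswith("sha256="):
--         return value.split("=", 1)[1].strip()
--     if "," in value and "=" in value:
--         best = None  # (rank, stripped value) of the best candidate seen so far
--         for item in value.split(","):
--             if "=" not in item:
--                 continue
--             key, val = item.split("=", 1)
--             rank = _PRIORITY.get(key.strip())
--             if rank is not None and (best is None or rank <= best[0]):
--                 best = (rank, val.strip())
--         if best is not None:
--             return best[1]
--     return value
-- ===== Notes on version B (the rewrite author's own statement) =====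
-- stated objective: alternative
-- what changed: Replaces A's two-stage dict build (all pairs, last write wins) plus priority lookups by a single forward pass that keeps one accumulator (rank, value) of the best-priority candidate seen so far, updating on rank <= current so a later equal-rank item overwrites; no dict and no second stage.
import Mathlib
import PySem

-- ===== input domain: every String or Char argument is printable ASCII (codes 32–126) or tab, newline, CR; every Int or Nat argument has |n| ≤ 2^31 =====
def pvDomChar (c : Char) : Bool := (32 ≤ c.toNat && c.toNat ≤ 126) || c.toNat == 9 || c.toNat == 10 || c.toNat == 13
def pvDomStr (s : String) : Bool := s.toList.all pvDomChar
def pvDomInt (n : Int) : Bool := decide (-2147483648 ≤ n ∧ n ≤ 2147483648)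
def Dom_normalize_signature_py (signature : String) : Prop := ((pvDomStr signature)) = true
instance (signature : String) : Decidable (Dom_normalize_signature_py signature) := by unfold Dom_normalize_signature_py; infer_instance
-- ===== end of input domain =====

-- B replaces A's dict build + staged priority lookups by one forward pass keeping a single
-- (rank, value) accumulator of the best-priority candidate so far (alternative decomposition, same cost).

-- ===== PORT A =====
-- stripped key of 'item.split("=", 1)'
def pvKeyOf (item : String) : String :=
  PySem.Str.strip (((PySem.Str.splitMax? item "=" 1).getD []).getD 0 "")
-- stripped value of 'item.split("=", 1)'
def pvValOf (item : String) : String :=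
  PySem.Str.strip (((PySem.Str.splitMax? item "=" 1).getD []).getD 1 "")

def normalize_signature_py (signature : String) : String :=
  if signature = "" then ""
  else
    let value := PySem.Str.strip signature
    if PySem.Str.startswith value "sha256=" then
      PySem.Str.strip (((PySem.Str.splitMax? value "=" 1).getD []).getD 1 "")
    else if PySem.Str.isIn "," value && PySem.Str.isIn "=" value then
      let parts : PySem.Dict String String :=
        ((PySem.Str.split? value ",").getD []).foldl
          (fun d item => if PySem.Str.isIn "=" item then d.insert (pvKeyOf item) (pvValOf item) else d)
          PySem.Dict.empty
      match parts.get? "v1" with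
      | some v => v
      | none =>
        match parts.get? "signature" with
        | some v => v
        | none =>
          match parts.get? "sig" with
          | some v => v
          | none => value
    else value

-- ===== PORT B =====
-- the module constant _PRIORITY, as an association-list lookup (_PRIORITY.get(k))
def pvRank (k : String) : Option Nat :=
  if k = "v1" then some 0 else if k = "signature" then some 1 else if k = "sig" then some 2 else none

-- one iteration of B's loop body over the accumulator 'best'
def pvStepB (best : Option (Nat × String)) (item : String) : Option (Nat × String) :=
  if PySem.Str.isIn "=" item then
    match pvRank (pvKeyOf item) with
    | none => best
    | some r =>
      match best with
      | none => some (r, pvValOf item)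
      | some (r0, v0) => if r ≤ r0 then some (r, pvValOf item) else some (r0, v0)
  else best

def normalize_signature_py_alt (signature : String) : String :=
  if signature = "" then ""
  else
    let value := PySem.Str.strip signature
    if PySem.Str.startswith value "sha256=" then
      PySem.Str.strip (((PySem.Str.splitMax? value "=" 1).getD []).getD 1 "")
    else if PySem.Str.isIn "," value && PySem.Str.isIn "=" value then
      match ((PySem.Str.split? value ",").getD []).foldl pvStepB none with
      | some (_, v) => v
      | none => value
    else value

-- ===== PRECONDITION & SPEC =====
def Spec_normalize_signature_py (signature : String) (out : String) : Prop := out = normalize_signature_py_alt signature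
instance (signature : String) (out : String) : Decidable (Spec_normalize_signature_py signature out) := by unfold Spec_normalize_signature_py; infer_instance

-- ===== CLAIM (what is proved, stated in full; the proofs are below) =====
def Claim_equal_normalize_signature_py : Prop := ∀ (signature : String), Dom_normalize_signature_py signature → Spec_normalize_signature_py signature (normalize_signature_py signature)

-- ===== LEMMAS AND PROOFS =====

-- abstraction of a dict into B's accumulator: the (rank, value) of the first priority key present
def pvRankedPick (d : PySem.Dict String String) : Option (Nat × String) :=
  match d.get? "v1" with
  | some v => some (0, v)
  | none =>
    match d.get? "signature" with
    | some v => some (1, v)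
    | none =>
      match d.get? "sig" with
      | some v => some (2, v)
      | none => none

-- one step of B's loop simulates one step of A's dict-building loop through pvRankedPick
theorem pvStep_comm (d : PySem.Dict String String) (item : String) :
    pvStepB (pvRankedPick d) item
      = pvRankedPick (if PySem.Str.isIn "=" item then d.insert (pvKeyOf item) (pvValOf item) else d) := by
  by_cases hp : PySem.Str.isIn "=" item = true
  · rw [if_pos hp]
    unfold pvStepB pvRank pvRankedPick
    rw [if_pos hp]
    by_cases h1 : pvKeyOf item = "v1"
    · simp [h1, PySem.Dict.get?_insert_self]
      rcases d.get? "v1" with _ | v <;> rcases d.get? "signature" with _ | w <;>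
        rcases d.get? "sig" with _ | u <;> simp
    · by_cases h2 : pvKeyOf item = "signature"
      · simp [h2, PySem.Dict.get?_insert]
        rcases d.get? "v1" with _ | v <;> rcases d.get? "signature" with _ | w <;>
          rcases d.get? "sig" with _ | u <;> simp
      · by_cases h3 : pvKeyOf item = "sig"
        · simp [h3, PySem.Dict.get?_insert]
          rcases d.get? "v1" with _ | v <;> rcases d.get? "signature" with _ | w <;>
            rcases d.get? "sig" with _ | u <;> simp
        · simp [h1, h2, h3, PySem.Dict.get?_insert, Ne.symm h1, Ne.symm h2, Ne.symm h3]
  · rw [if_neg hp]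
    unfold pvStepB
    rw [if_neg hp]

-- B's whole fold simulates A's whole dict-building fold through pvRankedPick
theorem pvFold_comm (items : List String) : ∀ (d : PySem.Dict String String),
    items.foldl pvStepB (pvRankedPick d)
      = pvRankedPick (items.foldl
          (fun d item => if PySem.Str.isIn "=" item then d.insert (pvKeyOf item) (pvValOf item) else d) d) := by
  induction items with
  | nil => intro d; rfl
  | cons x t ih =>
    intro d
    simp only [List.foldl_cons]
    rw [pvStep_comm d x, ih]

-- ===== VERDICT (by name: the statement is the Claim_ definition above) =====
theorem normalize_signature_py_spec : Claim_equal_normalize_signature_py := by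
  intro signature _
  unfold Spec_normalize_signature_py normalize_signature_py normalize_signature_py_alt
  by_cases h0 : signature = ""
  · rw [if_pos h0, if_pos h0]
  · rw [if_neg h0, if_neg h0]
    by_cases h1 : PySem.Str.startswith (PySem.Str.strip signature) "sha256=" = true
    · rw [if_pos h1, if_pos h1]
    · rw [if_neg h1, if_neg h1]
      by_cases h2 : (PySem.Str.isIn "," (PySem.Str.strip signature)
          && PySem.Str.isIn "=" (PySem.Str.strip signature)) = true
      · rw [if_pos h2, if_pos h2]
        have h := pvFold_comm ((PySem.Str.split? (PySem.Str.strip signature) ",").getD []) PySem.Dict.empty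
        have he : pvRankedPick PySem.Dict.empty = none := rfl
        rw [he] at h
        rw [h]
        generalize (((PySem.Str.split? (PySem.Str.strip signature) ",").getD []).foldl
          (fun d item => if PySem.Str.isIn "=" item then d.insert (pvKeyOf item) (pvValOf item) else d)
          PySem.Dict.empty) = D
        unfold pvRankedPick
        rcases hv : D.get? "v1" with _ | v
        · rcases hw : D.get? "signature" with _ | w
          · rcases hu : D.get? "sig" with _ | u <;> simp only [hv, hw, hu]
          · simp only [hv, hw]
        · simp only [hv]
      · rw [if_neg h2, if_neg h2]
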